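-- pv_equiv track=rewrite | github.com/kumaxxp/jetracer-agent | http_server/core/training_manager.py | _get_road_label_ids
-- ===== SOURCE A (Python) =====
-- def _get_road_label_ids(road_labels: list) -> set:
--     """「ROADラベル名からADE20K IDを取得"""
--     # ADE20Kラベルをローカルで定義（インポート問題回避）
--     ADE20K_LABELS = {
--         3: "floor", 4: "floor", 7: "road", 12: "sidewalk",
--         29: "rug", 30: "field", 47: "sand", 53: "path",
--         55: "runway", 92: "dirt track", 109: "plaything"
--     }
--
--     road_label_ids = set()
--     for label_name in road_labels:
--         for lid, lname in ADE20K_LABELS.items():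
--             if lname == label_name:
--                 road_label_ids.add(lid)
--                 break
--     return road_label_ids
-- ===== SOURCE B (Python) =====
-- def _get_road_label_ids(road_labels: list) -> set:
--     """ROAD label names -> ADE20K id set, resolved by binary search over a sorted name table."""
--     # first-occurrence (name, id) pairs of ADE20K_LABELS, pre-sorted by name
--     NAMES = ("dirt track", "field", "floor", "path", "plaything",
--              "road", "rug", "runway", "sand", "sidewalk")
--     IDS = (92, 30, 3, 53, 109, 7, 29, 55, 47, 12)
--     out = set()
--     for name in road_labels:
--         lo, hi = 0, len(NAMES)
--         while lo < hi:  # lower-bound binary search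
--             mid = (lo + hi) // 2
--             if NAMES[mid] < name:
--                 lo = mid + 1
--             else:
--                 hi = mid
--         if lo < len(NAMES) and NAMES[lo] == name:
--             out.add(IDS[lo])
--     return out
-- ===== Notes on version B (the rewrite author's own statement) =====
-- stated objective: alternative
-- what changed: B replaces A's linear first-match scan of the id->name dict per label by lower-bound binary search over a static name-sorted parallel table (NAMES/IDS), a different lookup algorithm and data layout.
import Mathlib
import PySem

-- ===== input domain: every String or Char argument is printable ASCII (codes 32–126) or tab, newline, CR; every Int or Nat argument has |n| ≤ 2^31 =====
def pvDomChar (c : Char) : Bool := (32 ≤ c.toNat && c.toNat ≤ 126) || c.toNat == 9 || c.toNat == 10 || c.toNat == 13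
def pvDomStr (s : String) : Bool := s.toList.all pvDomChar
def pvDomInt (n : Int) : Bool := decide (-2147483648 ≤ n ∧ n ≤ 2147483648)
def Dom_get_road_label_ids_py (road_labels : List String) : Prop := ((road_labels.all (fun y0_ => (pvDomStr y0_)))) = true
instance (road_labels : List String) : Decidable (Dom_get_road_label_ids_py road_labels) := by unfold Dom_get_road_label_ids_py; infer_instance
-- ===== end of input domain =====

-- B resolves each label by lower-bound binary search over a static name-sorted table instead of
-- A's linear scan of the id→name dict with break (alternative algorithm; same return value).

-- ===== PORT A =====
-- ADE20K_LABELS.items(), in insertion order.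
def adeItems : List (Int × String) :=
  [(3, "floor"), (4, "floor"), (7, "road"), (12, "sidewalk"),
   (29, "rug"), (30, "field"), (47, "sand"), (53, "path"),
   (55, "runway"), (92, "dirt track"), (109, "plaything")]

-- for label_name in road_labels: for lid, lname in items: if lname == label_name: add lid; break
def get_road_label_ids_py (road_labels : List String) : List Int :=
  road_labels.foldl (fun s label_name =>
    match adeItems.find? (fun p => p.2 == label_name) with
    | some p => PySem.Set.add s p.1
    | none => s) PySem.Set.empty

-- ===== PORT B =====
-- NAMES / IDS: the static sorted table from Source B
def bsNames : List String :=
  ["dirt track", "field", "floor", "path", "plaything",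
   "road", "rug", "runway", "sand", "sidewalk"]
def bsIds : List Int := [92, 30, 3, 53, 109, 7, 29, 55, 47, 12]

-- the 'while lo < hi' lower-bound loop (indices provably in range; getD "" = NAMES[mid])
def bsLoop (name : String) (lo hi : Nat) : Nat :=
  if h : lo < hi then
    let mid := (lo + hi) / 2
    if bsNames.getD mid "" < name then bsLoop name (mid + 1) hi else bsLoop name lo mid
  else lo
termination_by hi - lo
decreasing_by all_goals omega

def get_road_label_ids_py_alt (road_labels : List String) : List Int :=
  road_labels.foldl (fun out name =>
    let lo := bsLoop name 0 bsNames.length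
    if lo < bsNames.length && (bsNames.getD lo "" == name) then
      PySem.Set.add out (bsIds.getD lo 0)
    else out) PySem.Set.empty

-- ===== PRECONDITION & SPEC =====
def Spec_get_road_label_ids_py (road_labels : List String) (out : List Int) : Prop := out = get_road_label_ids_py_alt road_labels
instance (road_labels : List String) (out : List Int) : Decidable (Spec_get_road_label_ids_py road_labels out) := by unfold Spec_get_road_label_ids_py; infer_instance

-- ===== CLAIM (what is proved, stated in full; the proofs are below) =====
def Claim_equal_get_road_label_ids_py : Prop := ∀ (road_labels : List String), Dom_get_road_label_ids_py road_labels → Spec_get_road_label_ids_py road_labels (get_road_label_ids_py road_labels)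

-- ===== LEMMAS AND PROOFS =====

-- A's find? returns none when name lies strictly between a and b and no table name does
theorem find_none_mid (name a b : String) (ha : a < name) (hb : name < b)
    (H : ∀ p ∈ adeItems, p.2 ≤ a ∨ b ≤ p.2) :
    adeItems.find? (fun p => p.2 == name) = none := by
  rw [List.find?_eq_none]
  intro p hp
  rcases H p hp with h | h
  · simp only [beq_iff_eq]; exact ne_of_lt (lt_of_le_of_lt h ha)
  · simp only [beq_iff_eq]; exact ne_of_gt (lt_of_lt_of_le hb h)

theorem find_none_lo (name a : String) (ha : a < name)
    (H : ∀ p ∈ adeItems, p.2 ≤ a) :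
    adeItems.find? (fun p => p.2 == name) = none := by
  rw [List.find?_eq_none]
  intro p hp
  simp only [beq_iff_eq]; exact ne_of_lt (lt_of_le_of_lt (H p hp) ha)

theorem find_none_hi (name b : String) (hb : name < b)
    (H : ∀ p ∈ adeItems, b ≤ p.2) :
    adeItems.find? (fun p => p.2 == name) = none := by
  rw [List.find?_eq_none]
  intro p hp
  simp only [beq_iff_eq]; exact ne_of_gt (lt_of_lt_of_le hb (H p hp))

theorem bsLoop_step (name : String) (lo hi : Nat) (h : lo < hi) :
    bsLoop name lo hi = if bsNames.getD ((lo + hi) / 2) "" < name then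
      bsLoop name ((lo + hi) / 2 + 1) hi else bsLoop name lo ((lo + hi) / 2) := by
  rw [bsLoop, dif_pos h]

theorem bsLoop_term (name : String) (k : Nat) : bsLoop name k k = k := by
  rw [bsLoop]; simp

-- per-name agreement: binary-search resolution = A's first-match scan
theorem resolve_eq (name : String) :
    (if (decide (bsLoop name 0 bsNames.length < bsNames.length) && (bsNames.getD (bsLoop name 0 bsNames.length) "" == name)) = true then some (bsIds.getD (bsLoop name 0 bsNames.length) 0) else none) =
    (adeItems.find? (fun p => p.2 == name)).map Prod.fst := by
  rw [show bsNames.length = 10 from rfl]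
  by_cases h5 : "road" < name
  ·
    by_cases h8 : "sand" < name
    ·
      by_cases h9 : "sidewalk" < name
      ·
        have hb : bsLoop name 0 10 = 10 := by
          rw [show bsLoop name 0 10 = if bsNames.getD 5 "" < name then bsLoop name 6 10 else bsLoop name 0 5 from bsLoop_step name 0 10 (by norm_num)]
          rw [show bsNames.getD 5 "" = "road" from rfl]
          rw [if_pos h5]
          rw [show bsLoop name 6 10 = if bsNames.getD 8 "" < name then bsLoop name 9 10 else bsLoop name 6 8 from bsLoop_step name 6 10 (by norm_num)]
          rw [show bsNames.getD 8 "" = "sand" from rfl]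
          rw [if_pos h8]
          rw [show bsLoop name 9 10 = if bsNames.getD 9 "" < name then bsLoop name 10 10 else bsLoop name 9 9 from bsLoop_step name 9 10 (by norm_num)]
          rw [show bsNames.getD 9 "" = "sidewalk" from rfl]
          rw [if_pos h9]
          rw [bsLoop_term]
        rw [hb]
        rw [show (decide (10 < 10) && (bsNames.getD 10 "" == name)) = false from by simp]
        rw [if_neg (by simp), find_none_lo name "sidewalk" h9 (by simp only [String.le_iff_toList_le]; decide)]
        rfl
      ·
        have hb : bsLoop name 0 10 = 9 := by
          rw [show bsLoop name 0 10 = if bsNames.getD 5 "" < name then bsLoop name 6 10 else bsLoop name 0 5 from bsLoop_step name 0 10 (by norm_num)]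
          rw [show bsNames.getD 5 "" = "road" from rfl]
          rw [if_pos h5]
          rw [show bsLoop name 6 10 = if bsNames.getD 8 "" < name then bsLoop name 9 10 else bsLoop name 6 8 from bsLoop_step name 6 10 (by norm_num)]
          rw [show bsNames.getD 8 "" = "sand" from rfl]
          rw [if_pos h8]
          rw [show bsLoop name 9 10 = if bsNames.getD 9 "" < name then bsLoop name 10 10 else bsLoop name 9 9 from bsLoop_step name 9 10 (by norm_num)]
          rw [show bsNames.getD 9 "" = "sidewalk" from rfl]
          rw [if_neg h9]
          rw [bsLoop_term]
        rw [hb]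
        rw [show (decide (9 < 10) && (bsNames.getD 9 "" == name)) = ("sidewalk" == name) from by rw [show bsNames.getD 9 "" = "sidewalk" from rfl]; simp]
        by_cases heq : name = "sidewalk"
        · subst heq; decide
        · have hup : name < "sidewalk" := lt_of_le_of_ne (not_lt.mp h9) heq
          rw [if_neg (by simp [beq_iff_eq]; exact Ne.symm heq), find_none_mid name "sand" "sidewalk" h8 hup (by simp only [String.le_iff_toList_le]; decide)]
          rfl
    ·
      by_cases h7 : "runway" < name
      ·
        have hb : bsLoop name 0 10 = 8 := by
          rw [show bsLoop name 0 10 = if bsNames.getD 5 "" < name then bsLoop name 6 10 else bsLoop name 0 5 from bsLoop_step name 0 10 (by norm_num)]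
          rw [show bsNames.getD 5 "" = "road" from rfl]
          rw [if_pos h5]
          rw [show bsLoop name 6 10 = if bsNames.getD 8 "" < name then bsLoop name 9 10 else bsLoop name 6 8 from bsLoop_step name 6 10 (by norm_num)]
          rw [show bsNames.getD 8 "" = "sand" from rfl]
          rw [if_neg h8]
          rw [show bsLoop name 6 8 = if bsNames.getD 7 "" < name then bsLoop name 8 8 else bsLoop name 6 7 from bsLoop_step name 6 8 (by norm_num)]
          rw [show bsNames.getD 7 "" = "runway" from rfl]
          rw [if_pos h7]
          rw [bsLoop_term]
        rw [hb]
        rw [show (decide (8 < 10) && (bsNames.getD 8 "" == name)) = ("sand" == name) from by rw [show bsNames.getD 8 "" = "sand" from rfl]; simp]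
        by_cases heq : name = "sand"
        · subst heq; decide
        · have hup : name < "sand" := lt_of_le_of_ne (not_lt.mp h8) heq
          rw [if_neg (by simp [beq_iff_eq]; exact Ne.symm heq), find_none_mid name "runway" "sand" h7 hup (by simp only [String.le_iff_toList_le]; decide)]
          rfl
      ·
        by_cases h6 : "rug" < name
        ·
          have hb : bsLoop name 0 10 = 7 := by
            rw [show bsLoop name 0 10 = if bsNames.getD 5 "" < name then bsLoop name 6 10 else bsLoop name 0 5 from bsLoop_step name 0 10 (by norm_num)]
            rw [show bsNames.getD 5 "" = "road" from rfl]
            rw [if_pos h5]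
            rw [show bsLoop name 6 10 = if bsNames.getD 8 "" < name then bsLoop name 9 10 else bsLoop name 6 8 from bsLoop_step name 6 10 (by norm_num)]
            rw [show bsNames.getD 8 "" = "sand" from rfl]
            rw [if_neg h8]
            rw [show bsLoop name 6 8 = if bsNames.getD 7 "" < name then bsLoop name 8 8 else bsLoop name 6 7 from bsLoop_step name 6 8 (by norm_num)]
            rw [show bsNames.getD 7 "" = "runway" from rfl]
            rw [if_neg h7]
            rw [show bsLoop name 6 7 = if bsNames.getD 6 "" < name then bsLoop name 7 7 else bsLoop name 6 6 from bsLoop_step name 6 7 (by norm_num)]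
            rw [show bsNames.getD 6 "" = "rug" from rfl]
            rw [if_pos h6]
            rw [bsLoop_term]
          rw [hb]
          rw [show (decide (7 < 10) && (bsNames.getD 7 "" == name)) = ("runway" == name) from by rw [show bsNames.getD 7 "" = "runway" from rfl]; simp]
          by_cases heq : name = "runway"
          · subst heq; decide
          · have hup : name < "runway" := lt_of_le_of_ne (not_lt.mp h7) heq
            rw [if_neg (by simp [beq_iff_eq]; exact Ne.symm heq), find_none_mid name "rug" "runway" h6 hup (by simp only [String.le_iff_toList_le]; decide)]
            rfl
        ·
          have hb : bsLoop name 0 10 = 6 := by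
            rw [show bsLoop name 0 10 = if bsNames.getD 5 "" < name then bsLoop name 6 10 else bsLoop name 0 5 from bsLoop_step name 0 10 (by norm_num)]
            rw [show bsNames.getD 5 "" = "road" from rfl]
            rw [if_pos h5]
            rw [show bsLoop name 6 10 = if bsNames.getD 8 "" < name then bsLoop name 9 10 else bsLoop name 6 8 from bsLoop_step name 6 10 (by norm_num)]
            rw [show bsNames.getD 8 "" = "sand" from rfl]
            rw [if_neg h8]
            rw [show bsLoop name 6 8 = if bsNames.getD 7 "" < name then bsLoop name 8 8 else bsLoop name 6 7 from bsLoop_step name 6 8 (by norm_num)]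
            rw [show bsNames.getD 7 "" = "runway" from rfl]
            rw [if_neg h7]
            rw [show bsLoop name 6 7 = if bsNames.getD 6 "" < name then bsLoop name 7 7 else bsLoop name 6 6 from bsLoop_step name 6 7 (by norm_num)]
            rw [show bsNames.getD 6 "" = "rug" from rfl]
            rw [if_neg h6]
            rw [bsLoop_term]
          rw [hb]
          rw [show (decide (6 < 10) && (bsNames.getD 6 "" == name)) = ("rug" == name) from by rw [show bsNames.getD 6 "" = "rug" from rfl]; simp]
          by_cases heq : name = "rug"
          · subst heq; decide
          · have hup : name < "rug" := lt_of_le_of_ne (not_lt.mp h6) heq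
            rw [if_neg (by simp [beq_iff_eq]; exact Ne.symm heq), find_none_mid name "road" "rug" h5 hup (by simp only [String.le_iff_toList_le]; decide)]
            rfl
  ·
    by_cases h2 : "floor" < name
    ·
      by_cases h4 : "plaything" < name
      ·
        have hb : bsLoop name 0 10 = 5 := by
          rw [show bsLoop name 0 10 = if bsNames.getD 5 "" < name then bsLoop name 6 10 else bsLoop name 0 5 from bsLoop_step name 0 10 (by norm_num)]
          rw [show bsNames.getD 5 "" = "road" from rfl]
          rw [if_neg h5]
          rw [show bsLoop name 0 5 = if bsNames.getD 2 "" < name then bsLoop name 3 5 else bsLoop name 0 2 from bsLoop_step name 0 5 (by norm_num)]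
          rw [show bsNames.getD 2 "" = "floor" from rfl]
          rw [if_pos h2]
          rw [show bsLoop name 3 5 = if bsNames.getD 4 "" < name then bsLoop name 5 5 else bsLoop name 3 4 from bsLoop_step name 3 5 (by norm_num)]
          rw [show bsNames.getD 4 "" = "plaything" from rfl]
          rw [if_pos h4]
          rw [bsLoop_term]
        rw [hb]
        rw [show (decide (5 < 10) && (bsNames.getD 5 "" == name)) = ("road" == name) from by rw [show bsNames.getD 5 "" = "road" from rfl]; simp]
        by_cases heq : name = "road"
        · subst heq; decide
        · have hup : name < "road" := lt_of_le_of_ne (not_lt.mp h5) heq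
          rw [if_neg (by simp [beq_iff_eq]; exact Ne.symm heq), find_none_mid name "plaything" "road" h4 hup (by simp only [String.le_iff_toList_le]; decide)]
          rfl
      ·
        by_cases h3 : "path" < name
        ·
          have hb : bsLoop name 0 10 = 4 := by
            rw [show bsLoop name 0 10 = if bsNames.getD 5 "" < name then bsLoop name 6 10 else bsLoop name 0 5 from bsLoop_step name 0 10 (by norm_num)]
            rw [show bsNames.getD 5 "" = "road" from rfl]
            rw [if_neg h5]
            rw [show bsLoop name 0 5 = if bsNames.getD 2 "" < name then bsLoop name 3 5 else bsLoop name 0 2 from bsLoop_step name 0 5 (by norm_num)]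
            rw [show bsNames.getD 2 "" = "floor" from rfl]
            rw [if_pos h2]
            rw [show bsLoop name 3 5 = if bsNames.getD 4 "" < name then bsLoop name 5 5 else bsLoop name 3 4 from bsLoop_step name 3 5 (by norm_num)]
            rw [show bsNames.getD 4 "" = "plaything" from rfl]
            rw [if_neg h4]
            rw [show bsLoop name 3 4 = if bsNames.getD 3 "" < name then bsLoop name 4 4 else bsLoop name 3 3 from bsLoop_step name 3 4 (by norm_num)]
            rw [show bsNames.getD 3 "" = "path" from rfl]
            rw [if_pos h3]
            rw [bsLoop_term]
          rw [hb]
          rw [show (decide (4 < 10) && (bsNames.getD 4 "" == name)) = ("plaything" == name) from by rw [show bsNames.getD 4 "" = "plaything" from rfl]; simp]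
          by_cases heq : name = "plaything"
          · subst heq; decide
          · have hup : name < "plaything" := lt_of_le_of_ne (not_lt.mp h4) heq
            rw [if_neg (by simp [beq_iff_eq]; exact Ne.symm heq), find_none_mid name "path" "plaything" h3 hup (by simp only [String.le_iff_toList_le]; decide)]
            rfl
        ·
          have hb : bsLoop name 0 10 = 3 := by
            rw [show bsLoop name 0 10 = if bsNames.getD 5 "" < name then bsLoop name 6 10 else bsLoop name 0 5 from bsLoop_step name 0 10 (by norm_num)]
            rw [show bsNames.getD 5 "" = "road" from rfl]
            rw [if_neg h5]
            rw [show bsLoop name 0 5 = if bsNames.getD 2 "" < name then bsLoop name 3 5 else bsLoop name 0 2 from bsLoop_step name 0 5 (by norm_num)]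
            rw [show bsNames.getD 2 "" = "floor" from rfl]
            rw [if_pos h2]
            rw [show bsLoop name 3 5 = if bsNames.getD 4 "" < name then bsLoop name 5 5 else bsLoop name 3 4 from bsLoop_step name 3 5 (by norm_num)]
            rw [show bsNames.getD 4 "" = "plaything" from rfl]
            rw [if_neg h4]
            rw [show bsLoop name 3 4 = if bsNames.getD 3 "" < name then bsLoop name 4 4 else bsLoop name 3 3 from bsLoop_step name 3 4 (by norm_num)]
            rw [show bsNames.getD 3 "" = "path" from rfl]
            rw [if_neg h3]
            rw [bsLoop_term]
          rw [hb]
          rw [show (decide (3 < 10) && (bsNames.getD 3 "" == name)) = ("path" == name) from by rw [show bsNames.getD 3 "" = "path" from rfl]; simp]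
          by_cases heq : name = "path"
          · subst heq; decide
          · have hup : name < "path" := lt_of_le_of_ne (not_lt.mp h3) heq
            rw [if_neg (by simp [beq_iff_eq]; exact Ne.symm heq), find_none_mid name "floor" "path" h2 hup (by simp only [String.le_iff_toList_le]; decide)]
            rfl
    ·
      by_cases h1 : "field" < name
      ·
        have hb : bsLoop name 0 10 = 2 := by
          rw [show bsLoop name 0 10 = if bsNames.getD 5 "" < name then bsLoop name 6 10 else bsLoop name 0 5 from bsLoop_step name 0 10 (by norm_num)]
          rw [show bsNames.getD 5 "" = "road" from rfl]
          rw [if_neg h5]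
          rw [show bsLoop name 0 5 = if bsNames.getD 2 "" < name then bsLoop name 3 5 else bsLoop name 0 2 from bsLoop_step name 0 5 (by norm_num)]
          rw [show bsNames.getD 2 "" = "floor" from rfl]
          rw [if_neg h2]
          rw [show bsLoop name 0 2 = if bsNames.getD 1 "" < name then bsLoop name 2 2 else bsLoop name 0 1 from bsLoop_step name 0 2 (by norm_num)]
          rw [show bsNames.getD 1 "" = "field" from rfl]
          rw [if_pos h1]
          rw [bsLoop_term]
        rw [hb]
        rw [show (decide (2 < 10) && (bsNames.getD 2 "" == name)) = ("floor" == name) from by rw [show bsNames.getD 2 "" = "floor" from rfl]; simp]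
        by_cases heq : name = "floor"
        · subst heq; decide
        · have hup : name < "floor" := lt_of_le_of_ne (not_lt.mp h2) heq
          rw [if_neg (by simp [beq_iff_eq]; exact Ne.symm heq), find_none_mid name "field" "floor" h1 hup (by simp only [String.le_iff_toList_le]; decide)]
          rfl
      ·
        by_cases h0 : "dirt track" < name
        ·
          have hb : bsLoop name 0 10 = 1 := by
            rw [show bsLoop name 0 10 = if bsNames.getD 5 "" < name then bsLoop name 6 10 else bsLoop name 0 5 from bsLoop_step name 0 10 (by norm_num)]
            rw [show bsNames.getD 5 "" = "road" from rfl]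
            rw [if_neg h5]
            rw [show bsLoop name 0 5 = if bsNames.getD 2 "" < name then bsLoop name 3 5 else bsLoop name 0 2 from bsLoop_step name 0 5 (by norm_num)]
            rw [show bsNames.getD 2 "" = "floor" from rfl]
            rw [if_neg h2]
            rw [show bsLoop name 0 2 = if bsNames.getD 1 "" < name then bsLoop name 2 2 else bsLoop name 0 1 from bsLoop_step name 0 2 (by norm_num)]
            rw [show bsNames.getD 1 "" = "field" from rfl]
            rw [if_neg h1]
            rw [show bsLoop name 0 1 = if bsNames.getD 0 "" < name then bsLoop name 1 1 else bsLoop name 0 0 from bsLoop_step name 0 1 (by norm_num)]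
            rw [show bsNames.getD 0 "" = "dirt track" from rfl]
            rw [if_pos h0]
            rw [bsLoop_term]
          rw [hb]
          rw [show (decide (1 < 10) && (bsNames.getD 1 "" == name)) = ("field" == name) from by rw [show bsNames.getD 1 "" = "field" from rfl]; simp]
          by_cases heq : name = "field"
          · subst heq; decide
          · have hup : name < "field" := lt_of_le_of_ne (not_lt.mp h1) heq
            rw [if_neg (by simp [beq_iff_eq]; exact Ne.symm heq), find_none_mid name "dirt track" "field" h0 hup (by simp only [String.le_iff_toList_le]; decide)]
            rfl
        ·
          have hb : bsLoop name 0 10 = 0 := by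
            rw [show bsLoop name 0 10 = if bsNames.getD 5 "" < name then bsLoop name 6 10 else bsLoop name 0 5 from bsLoop_step name 0 10 (by norm_num)]
            rw [show bsNames.getD 5 "" = "road" from rfl]
            rw [if_neg h5]
            rw [show bsLoop name 0 5 = if bsNames.getD 2 "" < name then bsLoop name 3 5 else bsLoop name 0 2 from bsLoop_step name 0 5 (by norm_num)]
            rw [show bsNames.getD 2 "" = "floor" from rfl]
            rw [if_neg h2]
            rw [show bsLoop name 0 2 = if bsNames.getD 1 "" < name then bsLoop name 2 2 else bsLoop name 0 1 from bsLoop_step name 0 2 (by norm_num)]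
            rw [show bsNames.getD 1 "" = "field" from rfl]
            rw [if_neg h1]
            rw [show bsLoop name 0 1 = if bsNames.getD 0 "" < name then bsLoop name 1 1 else bsLoop name 0 0 from bsLoop_step name 0 1 (by norm_num)]
            rw [show bsNames.getD 0 "" = "dirt track" from rfl]
            rw [if_neg h0]
            rw [bsLoop_term]
          rw [hb]
          rw [show (decide (0 < 10) && (bsNames.getD 0 "" == name)) = ("dirt track" == name) from by rw [show bsNames.getD 0 "" = "dirt track" from rfl]; simp]
          by_cases heq : name = "dirt track"
          · subst heq; decide
          · have hup : name < "dirt track" := lt_of_le_of_ne (not_lt.mp h0) heq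
            rw [if_neg (by simp [beq_iff_eq]; exact Ne.symm heq), find_none_hi name "dirt track" hup (by simp only [String.le_iff_toList_le]; decide)]
            rfl

-- the two per-label loop bodies are the same function
theorem step_eq :
    (fun (s : List Int) label_name =>
      match adeItems.find? (fun p => p.2 == label_name) with
      | some p => PySem.Set.add s p.1
      | none => s) =
    (fun (out : List Int) name =>
      let lo := bsLoop name 0 bsNames.length
      if lo < bsNames.length && (bsNames.getD lo "" == name) then
        PySem.Set.add out (bsIds.getD lo 0)
      else out) := by
  funext s name
  have h := resolve_eq name
  show _ = (if (decide (bsLoop name 0 bsNames.length < bsNames.length) &&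
      (bsNames.getD (bsLoop name 0 bsNames.length) "" == name)) = true then
      PySem.Set.add s (bsIds.getD (bsLoop name 0 bsNames.length) 0) else s)
  rcases hf : adeItems.find? (fun p => p.2 == name) with _ | p <;> rw [hf] at h <;>
    rcases hc : (decide (bsLoop name 0 bsNames.length < bsNames.length) &&
        (bsNames.getD (bsLoop name 0 bsNames.length) "" == name)) with _ | _ <;>
    rw [hc] at h <;> simp only [if_true, if_false, Bool.false_eq_true] at h
  · rw [hf]; rfl
  · exact absurd h (by simp)
  · exact absurd h (by simp)
  · simp only [Option.map] at h
    rw [Option.some_inj.mp h, hf, if_pos rfl]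

-- ===== VERDICT (by name: the statement is the Claim_ definition above) =====
theorem get_road_label_ids_py_spec : Claim_equal_get_road_label_ids_py := by
  intro road_labels _
  show get_road_label_ids_py road_labels = get_road_label_ids_py_alt road_labels
  unfold get_road_label_ids_py get_road_label_ids_py_alt
  rw [step_eq]
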